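-- pv_equiv track=rewrite | github.com/dumplingleon65-prog/codeassist | policy_models/rewards.py | _trim_line_span
-- ===== SOURCE A (Python) =====
-- from typing import Dict, Any, List, Optional, Set, Tuple
--
-- def _trim_line_span(line: str, span: Any) -> Tuple[int, int]:
--     if not isinstance(line, str):
--         return (0, 0)
--     if not isinstance(span, (list, tuple)) or len(span) != 2:
--         return (0, 0)
--     n = len(line)
--     try:
--         start = int(span[0])
--         end = int(span[1])
--     except (TypeError, ValueError):
--         return (0, 0)
--     start = max(0, min(n, start))
--     end = max(start, min(n, end))
--     while start < end and line[start].isspace():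
--         start += 1
--     while end > start and line[end - 1].isspace():
--         end -= 1
--     return (start, end)
-- ===== SOURCE B (Python) =====
-- def _trim_line_span(line, span):
--     if not isinstance(line, str):
--         return (0, 0)
--     if not isinstance(span, (list, tuple)) or len(span) != 2:
--         return (0, 0)
--     n = len(line)
--     try:
--         start = int(span[0])
--         end = int(span[1])
--     except (TypeError, ValueError):
--         return (0, 0)
--     start = max(0, min(n, start))
--     end = max(start, min(n, end))
--     sub = line[start:end]
--     lead = sub.lstrip()
--     new_start = start + (len(sub) - len(lead))
--     new_end = new_start + len(lead.rstrip())
--     return (new_start, new_end)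
-- ===== Notes on version B (the rewrite author's own statement) =====
-- stated objective: simpler
-- what changed: B replaces A's two index-stepping while-loops with one slice of the clamped span and whitespace measurement via str.lstrip/rstrip lengths.
import Mathlib
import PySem

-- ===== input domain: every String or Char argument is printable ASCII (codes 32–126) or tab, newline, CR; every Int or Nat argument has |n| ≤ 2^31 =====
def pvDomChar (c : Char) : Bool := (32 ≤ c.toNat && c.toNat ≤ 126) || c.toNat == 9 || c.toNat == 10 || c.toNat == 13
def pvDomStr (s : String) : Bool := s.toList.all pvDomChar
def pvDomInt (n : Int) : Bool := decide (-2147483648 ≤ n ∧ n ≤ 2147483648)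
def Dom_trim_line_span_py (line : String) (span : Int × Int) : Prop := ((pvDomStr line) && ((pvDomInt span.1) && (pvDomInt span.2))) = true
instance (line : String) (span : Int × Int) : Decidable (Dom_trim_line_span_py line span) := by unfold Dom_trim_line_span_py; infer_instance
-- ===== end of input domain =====

-- B trims the clamped span by slicing it out and measuring whitespace with lstrip/rstrip
-- lengths instead of A's two character-by-character index loops (objective: simpler).

-- ===== PORT A =====
-- 'while start < end and line[start].isspace(): start += 1'
def pvTrimFwd (cs : List Char) (s t : Nat) : Nat :=
  if _h : s < t then
    if PySem.Chars.isspace (cs.getD s ' ') then pvTrimFwd cs (s + 1) t else s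
  else s
termination_by t - s

-- 'while end > start and line[end - 1].isspace(): end -= 1'
def pvTrimBwd (cs : List Char) (s t : Nat) : Nat :=
  if _h : s < t then
    if PySem.Chars.isspace (cs.getD (t - 1) ' ') then pvTrimBwd cs s (t - 1) else t
  else t
termination_by t

-- the isinstance checks and int() conversions are identities under the type convention
def trim_line_span_py (line : String) (span : Int × Int) : Int × Int :=
  let cs := line.toList
  let n : Int := cs.length
  let start := max 0 (min n span.1)
  let e := max start (min n span.2)
  let s' := pvTrimFwd cs start.toNat e.toNat
  let e' := pvTrimBwd cs s' e.toNat
  ((s' : Int), (e' : Int))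

-- ===== PORT B =====
def trim_line_span_py_alt (line : String) (span : Int × Int) : Int × Int :=
  let cs := line.toList
  let n : Int := cs.length
  let start := max 0 (min n span.1)
  let e := max start (min n span.2)
  let sub := PySem.List.slice cs (some start) (some e)   -- line[start:end]
  let lead := PySem.Chars.lstrip sub                     -- sub.lstrip()
  let newStart := start + ((sub.length - lead.length : Nat) : Int)
  (newStart, newStart + ((PySem.Chars.rstrip lead).length : Int))

-- ===== PRECONDITION & SPEC =====
def Spec_trim_line_span_py (line : String) (span : Int × Int) (out : Int × Int) : Prop := out = trim_line_span_py_alt line span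
instance (line : String) (span : Int × Int) (out : Int × Int) : Decidable (Spec_trim_line_span_py line span out) := by unfold Spec_trim_line_span_py; infer_instance

-- ===== CLAIM (what is proved, stated in full; the proofs are below) =====
def Claim_equal_trim_line_span_py : Prop := ∀ (line : String) (span : Int × Int), Dom_trim_line_span_py line span → Spec_trim_line_span_py line span (trim_line_span_py line span)

-- ===== LEMMAS AND PROOFS =====
theorem pvTrimFwd_eq (cs : List Char) (s t : Nat) (ht : t ≤ cs.length) :
    pvTrimFwd cs s t
      = s + (((cs.drop s).take (t - s)).takeWhile PySem.Chars.isspace).length := by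
  fun_induction pvTrimFwd cs s t with
  | case1 s h hc ih =>
    have hslen : s < cs.length := lt_of_lt_of_le h ht
    have hdrop : cs.drop s = cs[s] :: cs.drop (s + 1) := List.drop_eq_getElem_cons hslen
    have hts : t - s = (t - (s + 1)) + 1 := by omega
    have hget : cs.getD s ' ' = cs[s] := List.getD_eq_getElem cs ' ' hslen
    rw [hdrop, hts, List.take_succ_cons, List.takeWhile_cons_of_pos (by rw [← hget]; exact hc)]
    simp [ih]; omega
  | case2 s h hc =>
    have hslen : s < cs.length := lt_of_lt_of_le h ht
    have hdrop : cs.drop s = cs[s] :: cs.drop (s + 1) := List.drop_eq_getElem_cons hslen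
    have hts : t - s = (t - (s + 1)) + 1 := by omega
    have hget : cs.getD s ' ' = cs[s] := List.getD_eq_getElem cs ' ' hslen
    rw [hdrop, hts, List.take_succ_cons, List.takeWhile_cons_of_neg (by rw [← hget]; simpa using hc)]
    simp
  | case3 s h =>
    have : t - s = 0 := by omega
    simp [this]

theorem pvTrimBwd_eq (cs : List Char) (s t : Nat) :
    s ≤ t → t ≤ cs.length →
    pvTrimBwd cs s t
      = s + (PySem.Chars.rstrip ((cs.drop s).take (t - s))).length := by
  fun_induction pvTrimBwd cs s t with
  | case1 t h hc ih =>
    intro hs ht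
    have hlen : t - 1 < cs.length := by omega
    have hget : cs.getD (t - 1) ' ' = cs[t - 1] := List.getD_eq_getElem cs ' ' hlen
    have hsplit : (cs.drop s).take (t - s)
        = (cs.drop s).take (t - 1 - s) ++ [cs[t - 1]] := by
      have h1 : t - s = (t - 1 - s) + 1 := by omega
      rw [h1, List.take_add_one]
      have heq : s + (t - 1 - s) = t - 1 := by omega
      have : (cs.drop s)[t - 1 - s]? = some cs[t - 1] := by
        rw [List.getElem?_drop, heq, List.getElem?_eq_getElem hlen]
      simp [this]
    rw [hsplit]
    have hrs : PySem.Chars.rstrip ((cs.drop s).take (t - 1 - s) ++ [cs[t - 1]])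
        = PySem.Chars.rstrip ((cs.drop s).take (t - 1 - s)) := by
      simp [PySem.Chars.rstrip, hget ▸ hc]
    rw [hrs, ih (by omega) (by omega)]
  | case2 t h hc =>
    intro hs ht
    have hlen : t - 1 < cs.length := by omega
    have hget : cs.getD (t - 1) ' ' = cs[t - 1] := List.getD_eq_getElem cs ' ' hlen
    have hsplit : (cs.drop s).take (t - s)
        = (cs.drop s).take (t - 1 - s) ++ [cs[t - 1]] := by
      have h1 : t - s = (t - 1 - s) + 1 := by omega
      rw [h1, List.take_add_one]
      have heq : s + (t - 1 - s) = t - 1 := by omega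
      have : (cs.drop s)[t - 1 - s]? = some cs[t - 1] := by
        rw [List.getElem?_drop, heq, List.getElem?_eq_getElem hlen]
      simp [this]
    rw [hsplit]
    have hrs : PySem.Chars.rstrip ((cs.drop s).take (t - 1 - s) ++ [cs[t - 1]])
        = (cs.drop s).take (t - 1 - s) ++ [cs[t - 1]] := by
      simp [PySem.Chars.rstrip, hget ▸ hc]
    rw [hrs]
    have hlt : (cs.drop s).length = cs.length - s := by simp
    simp [List.length_take, hlt]
    omega
  | case3 t h =>
    intro hs ht
    have : t - s = 0 := by omega
    simp [this, PySem.Chars.rstrip]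
    omega

theorem main_eq (line : String) (span : Int × Int) :
    (((pvTrimFwd line.toList (max 0 (min (line.toList.length : Int) span.1)).toNat (max (max 0 (min (line.toList.length : Int) span.1)) (min (line.toList.length : Int) span.2)).toNat : Nat) : Int),
     ((pvTrimBwd line.toList (pvTrimFwd line.toList (max 0 (min (line.toList.length : Int) span.1)).toNat (max (max 0 (min (line.toList.length : Int) span.1)) (min (line.toList.length : Int) span.2)).toNat) (max (max 0 (min (line.toList.length : Int) span.1)) (min (line.toList.length : Int) span.2)).toNat : Nat) : Int))
    = (max 0 (min (line.toList.length : Int) span.1) + (((PySem.List.slice line.toList (some (max 0 (min (line.toList.length : Int) span.1))) (some (max (max 0 (min (line.toList.length : Int) span.1)) (min (line.toList.length : Int) span.2)))).length - (PySem.Chars.lstrip (PySem.List.slice line.toList (some (max 0 (min (line.toList.length : Int) span.1))) (some (max (max 0 (min (line.toList.length : Int) span.1)) (min (line.toList.length : Int) span.2))))).length : Nat) : Int),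
       max 0 (min (line.toList.length : Int) span.1) + (((PySem.List.slice line.toList (some (max 0 (min (line.toList.length : Int) span.1))) (some (max (max 0 (min (line.toList.length : Int) span.1)) (min (line.toList.length : Int) span.2)))).length - (PySem.Chars.lstrip (PySem.List.slice line.toList (some (max 0 (min (line.toList.length : Int) span.1))) (some (max (max 0 (min (line.toList.length : Int) span.1)) (min (line.toList.length : Int) span.2))))).length : Nat) : Int)
         + ((PySem.Chars.rstrip (PySem.Chars.lstrip (PySem.List.slice line.toList (some (max 0 (min (line.toList.length : Int) span.1))) (some (max (max 0 (min (line.toList.length : Int) span.1)) (min (line.toList.length : Int) span.2)))))).length : Int)) := by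
  set cs := line.toList with hcs
  set n : Int := (cs.length : Int) with hn
  set start := max 0 (min n span.1) with hstart
  set e := max start (min n span.2) with he
  have h0 : 0 ≤ start := le_max_left _ _
  have hse : start ≤ e := le_max_left _ _
  have hn0 : (0 : Int) ≤ n := by rw [hn]; exact Int.natCast_nonneg _
  have hstartn : start ≤ n := max_le hn0 (min_le_left _ _)
  have hen : e ≤ n := max_le hstartn (min_le_left _ _)
  have h0e : 0 ≤ e := le_trans h0 hse
  set s := start.toNat with hs
  set t := e.toNat with ht
  have hsi : (s : Int) = start := Int.toNat_of_nonneg h0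
  have hti : (t : Int) = e := Int.toNat_of_nonneg h0e
  have hst : s ≤ t := by omega
  have htlen : t ≤ cs.length := by omega
  have hslice : PySem.List.slice cs (some start) (some e)
      = (cs.drop s).take (t - s) := PySem.List.slice_toNat cs h0 h0e
  set SUB := (cs.drop s).take (t - s) with hSUB
  have hsublen : SUB.length = t - s := by
    rw [hSUB]; simp; omega
  set kw := (SUB.takeWhile PySem.Chars.isspace).length with hkw
  have hlen_add : kw + (SUB.dropWhile PySem.Chars.isspace).length = SUB.length := by
    rw [hkw, ← List.length_append, List.takeWhile_append_dropWhile]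
  have hkwle : kw ≤ t - s := by omega
  have hlead : SUB.dropWhile PySem.Chars.isspace
      = (cs.drop (s + kw)).take (t - (s + kw)) := by
    have h1 : SUB.drop kw = SUB.dropWhile PySem.Chars.isspace := by
      have h2 := List.takeWhile_append_dropWhile (p := PySem.Chars.isspace) (l := SUB)
      calc SUB.drop kw
          = (SUB.takeWhile PySem.Chars.isspace ++ SUB.dropWhile PySem.Chars.isspace).drop
              (SUB.takeWhile PySem.Chars.isspace).length := by rw [h2, hkw]
        _ = SUB.dropWhile PySem.Chars.isspace := List.drop_left
    rw [← h1, hSUB, List.drop_take, List.drop_drop]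
    have e2 : t - s - kw = t - (s + kw) := by omega
    rw [e2]
  have hfwd : pvTrimFwd cs s t = s + kw := pvTrimFwd_eq cs s t htlen
  have hbwd : pvTrimBwd cs (s + kw) t
      = (s + kw) + (PySem.Chars.rstrip (SUB.dropWhile PySem.Chars.isspace)).length := by
    rw [pvTrimBwd_eq cs (s + kw) t (by omega) htlen, hlead]
  simp only [hslice, PySem.Chars.lstrip, hfwd, hbwd, Prod.mk.injEq]
  constructor
  · rw [← hsi]; push_cast; omega
  · rw [← hsi]; push_cast; omega

-- ===== VERDICT (by name: the statement is the Claim_ definition above) =====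
theorem trim_line_span_py_spec : Claim_equal_trim_line_span_py := by
  intro line span _
  unfold Spec_trim_line_span_py
  exact main_eq line span
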